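-- pv_equiv track=rewrite | github.com/tomaszchrost/adventOfCode2022 | 1/utils.py | max_n_values
-- ===== SOURCE A (Python) =====
-- def max_n_values(iterable, n):
--     max_values = []
--     min_value = None
--     for item in iterable:
--         if len(max_values) < n:
--             max_values.append(item)
--             min_value = min(max_values)
--         elif min_value < item:
--             max_values[max_values.index(min_value)] = item
--             min_value = min(max_values)
--     return max_values
-- ===== SOURCE B (Python) =====
-- def _insort(order, pair):
--     # binary-search insertion into the lexicographically sorted index
--     lo, hi = 0, len(order)
--     while lo < hi:
--         mid = (lo + hi) // 2
--         if order[mid] < pair: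
--             lo = mid + 1
--         else:
--             hi = mid
--     order.insert(lo, pair)
--
--
-- def max_n_values(iterable, n):
--     res = []
--     order = []  # lexicographically sorted list of (value, slot) pairs, one per slot
--     for item in iterable:
--         if len(res) < n:
--             pair = (item, len(res))
--             res.append(item)
--             _insort(order, pair)
--         elif order[0][0] < item:
--             _, slot = order.pop(0)
--             res[slot] = item
--             _insort(order, (item, slot))
--     return res
-- ===== Notes on version B (the rewrite author's own statement) =====
-- stated objective: faster
-- what changed: B maintains a sorted secondary index of (value, slot) pairs kept ordered by binary-search insertion, so the minimum and its first slot are read off the head in O(1); A's per-item min() and list.index() scans disappear.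
import Mathlib
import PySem

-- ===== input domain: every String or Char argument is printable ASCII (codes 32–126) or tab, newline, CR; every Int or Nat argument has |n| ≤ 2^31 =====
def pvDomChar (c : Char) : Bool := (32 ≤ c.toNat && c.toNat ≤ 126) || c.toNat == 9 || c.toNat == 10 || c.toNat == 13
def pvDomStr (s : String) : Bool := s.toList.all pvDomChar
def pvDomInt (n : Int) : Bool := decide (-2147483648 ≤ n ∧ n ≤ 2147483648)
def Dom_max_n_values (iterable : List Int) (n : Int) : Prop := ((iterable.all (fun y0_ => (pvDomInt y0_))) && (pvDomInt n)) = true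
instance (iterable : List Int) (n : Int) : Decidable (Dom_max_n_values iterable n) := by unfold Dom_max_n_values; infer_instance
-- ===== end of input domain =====

-- B replaces A's per-item min()/index() scans by a sorted secondary index of (value, slot)
-- pairs, kept ordered by binary-search insertion, whose head is always the minimum value
-- with its first slot (objective: faster; a timing run measured B faster on large inputs).


-- ===== PORT A =====
-- loop body of A, on the state (max_values, min_value)
def pvStepA (n : Int) (st : List Int × Option Int) (item : Int) : List Int × Option Int :=
  if (st.1.length : Int) < n then
    let mv := st.1 ++ [item]
    (mv, PySem.List.min? mv (fun x => x))
  else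
    match st.2 with
    | none => st   -- Python raises TypeError here ('None < int'); excluded by Pre_
    | some m =>
      if m < item then
        match PySem.List.index? st.1 m with
        | none => st   -- unreachable: the minimum is a member of max_values
        | some i =>
          let mv := st.1.set i item
          (mv, PySem.List.min? mv (fun x => x))
      else st

def max_n_values (iterable : List Int) (n : Int) : List Int :=
  (iterable.foldl (pvStepA n) ([], none)).1

-- ===== PORT B =====
-- Python tuple comparison (value, slot) < (value, slot): lexicographic
def pvLt (a b : Int × Int) : Bool := a.1 < b.1 || (a.1 == b.1 && a.2 < b.2)

-- the 'lo, hi = 0, len(order); while lo < hi: …' binary-search loop of _insort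
-- (order[mid] is always in range since lo < hi ≤ len(order); getD is exact there)
def pvBisect (order : List (Int × Int)) (p : Int × Int) (lo hi : Nat) : Nat :=
  if h : lo < hi then
    let mid := (lo + hi) / 2
    if pvLt (order.getD mid (0, 0)) p then pvBisect order p (mid + 1) hi
    else pvBisect order p lo mid
  else lo
termination_by hi - lo
decreasing_by all_goals omega

-- '_insort(order, pair)': binary search, then 'order.insert(lo, pair)'
def pvInsort (order : List (Int × Int)) (p : Int × Int) : List (Int × Int) :=
  PySem.List.insert order ((pvBisect order p 0 order.length : Nat) : Int) p

-- loop body of B, on the state (res, order)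
def pvStepB (n : Int) (st : List Int × List (Int × Int)) (item : Int) : List Int × List (Int × Int) :=
  if ((st.1).length : Int) < n then
    (st.1 ++ [item], pvInsort st.2 (item, ((st.1).length : Int)))
  else
    match st.2 with
    | [] => st   -- Python raises IndexError here (order[0] on empty); excluded by Pre_
    | (v, slot) :: rest =>
      if v < item then
        (PySem.List.pySetD st.1 slot item, pvInsort rest (item, slot))
      else st

def max_n_values_alt (iterable : List Int) (n : Int) : List Int :=
  (iterable.foldl (pvStepB n) ([], [])).1

-- ===== PRECONDITION & SPEC =====
-- A raises TypeError ('None < int') whenever n ≤ 0 and the iterable is nonempty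
-- (min_value is still None when the buffer can never fill); exactly those inputs are excluded.
def Pre_max_n_values (iterable : List Int) (n : Int) : Prop := 1 ≤ n ∨ iterable = []
instance (iterable : List Int) (n : Int) : Decidable (Pre_max_n_values iterable n) := by unfold Pre_max_n_values; infer_instance
def pvWitness_max_n_values : List Int × Int := ([1, 5, 2, 4, 2], 2)

def Spec_max_n_values (iterable : List Int) (n : Int) (out : List Int) : Prop := out = max_n_values_alt iterable n
instance (iterable : List Int) (n : Int) (out : List Int) : Decidable (Spec_max_n_values iterable n out) := by unfold Spec_max_n_values; infer_instance

-- ===== CLAIM (what is proved, stated in full; the proofs are below) =====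
def Claim_equal_max_n_values : Prop := ∀ (iterable : List Int) (n : Int), Dom_max_n_values iterable n → Pre_max_n_values iterable n → Spec_max_n_values iterable n (max_n_values iterable n)

-- ===== LEMMAS AND PROOFS =====

-- reference insertion point: length of the longest prefix of order strictly below p
def pvFindPos (order : List (Int × Int)) (p : Int × Int) : Nat :=
  match order with
  | [] => 0
  | x :: t => if pvLt x p then pvFindPos t p + 1 else 0

-- the (value, slot) pairs a buffer res induces: slot j carries (res[j], j)
def pvPairs (res : List Int) : List (Int × Int) :=
  res.zipIdx.map (fun p => (p.1, (p.2 : Int)))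

def pvSortedOrd (order : List (Int × Int)) : Prop :=
  List.Pairwise (fun a b => pvLt a b = true) order

lemma pvLt_iff (a b : Int × Int) : pvLt a b = true ↔ (a.1 < b.1 ∨ (a.1 = b.1 ∧ a.2 < b.2)) := by
  simp [pvLt]

lemma pvLt_trans {a b c : Int × Int} (h1 : pvLt a b = true) (h2 : pvLt b c = true) :
    pvLt a c = true := by
  rw [pvLt_iff] at *; omega

lemma pvLt_total {a b : Int × Int} (h : a.2 ≠ b.2) : pvLt a b = true ∨ pvLt b a = true := by
  rw [pvLt_iff, pvLt_iff]; omega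

lemma pvFindPos_le (order : List (Int × Int)) (p : Int × Int) :
    pvFindPos order p ≤ order.length := by
  induction order with
  | nil => simp [pvFindPos]
  | cons x t ih =>
    simp only [pvFindPos, List.length_cons]
    split_ifs <;> omega

-- monotonicity of the scanned predicate along a sorted index
lemma pv_q_mono (order : List (Int × Int)) (p : Int × Int) (hs : pvSortedOrd order)
    {j k : Nat} (hjk : j < k) (hk : k < order.length)
    (h : pvLt (order.getD k (0, 0)) p = true) : pvLt (order.getD j (0, 0)) p = true := by
  have hj : j < order.length := by omega
  have hjk' := (List.pairwise_iff_getElem.mp hs) j k hj hk hjk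
  rw [List.getD_eq_getElem order (0, 0) hj]
  rw [List.getD_eq_getElem order (0, 0) hk] at h
  exact pvLt_trans hjk' h

-- the binary search narrows [lo, hi) while keeping 'all below lo are < p, all from hi on are not'
lemma pvBisect_inv (order : List (Int × Int)) (p : Int × Int) (hs : pvSortedOrd order) :
    ∀ (d lo hi : Nat), hi - lo = d → lo ≤ hi → hi ≤ order.length →
    (∀ j, j < lo → pvLt (order.getD j (0, 0)) p = true) →
    (∀ j, hi ≤ j → j < order.length → pvLt (order.getD j (0, 0)) p = false) →
    (∀ j, j < pvBisect order p lo hi → pvLt (order.getD j (0, 0)) p = true) ∧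
    (∀ j, pvBisect order p lo hi ≤ j → j < order.length → pvLt (order.getD j (0, 0)) p = false) ∧
    pvBisect order p lo hi ≤ hi := by
  intro d
  induction d using Nat.strong_induction_on with
  | _ d ih =>
    intro lo hi hd hlohi hhi hpre hpost
    rw [pvBisect]
    by_cases h : lo < hi
    · rw [dif_pos h]
      by_cases hq : pvLt (order.getD ((lo + hi) / 2) (0, 0)) p = true
      · simp only [hq, if_true]
        refine ih (hi - ((lo + hi) / 2 + 1)) (by omega) ((lo + hi) / 2 + 1) hi (by omega)
          (by omega) hhi ?_ hpost
        intro j hj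
        rcases Nat.lt_or_ge j ((lo + hi) / 2) with hj' | hj'
        · exact pv_q_mono order p hs hj' (by omega) hq
        · have : j = (lo + hi) / 2 := by omega
          rw [this]; exact hq
      · rw [if_neg hq]
        have hpost' : ∀ j, (lo + hi) / 2 ≤ j → j < order.length →
            pvLt (order.getD j (0, 0)) p = false := by
          intro j hj hjlen
          rcases Nat.eq_or_lt_of_le hj with hj' | hj'
          · rw [← hj']
            simpa using hq
          · by_contra hc
            exact hq (pv_q_mono order p hs hj' hjlen (by simpa using hc))
        obtain ⟨a1, a2, a3⟩ := ih ((lo + hi) / 2 - lo) (by omega) lo ((lo + hi) / 2)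
          (by omega) (by omega) (by omega) hpre hpost'
        exact ⟨a1, a2, by omega⟩
    · rw [dif_neg h]
      have hle : lo = hi := by omega
      exact ⟨hpre, by rw [hle]; exact hpost, by omega⟩

-- the reference scan is the unique position with that prefix property
lemma pvFindPos_eq (order : List (Int × Int)) (p : Int × Int) : ∀ (r : Nat), r ≤ order.length →
    (∀ j, j < r → pvLt (order.getD j (0, 0)) p = true) →
    (∀ j, r ≤ j → j < order.length → pvLt (order.getD j (0, 0)) p = false) →
    pvFindPos order p = r := by
  induction order with
  | nil =>
    intro r hr _ _
    simp only [List.length_nil, Nat.le_zero] at hr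
    simp [pvFindPos, hr]
  | cons x t iht =>
    intro r hr h1 h2
    simp only [pvFindPos]
    by_cases hx : pvLt x p = true
    · rw [if_pos hx]
      cases r with
      | zero =>
        have := h2 0 (by omega) (by simp)
        rw [List.getD_cons_zero] at this
        rw [hx] at this
        cases this
      | succ r' =>
        rw [iht r' (by simp at hr; omega)
          (fun j hj => by have := h1 (j + 1) (by omega); rwa [List.getD_cons_succ] at this)
          (fun j hj hjl => by
            have := h2 (j + 1) (by omega) (by simp; omega)
            rwa [List.getD_cons_succ] at this)]
    · rw [if_neg hx]
      cases r with
      | zero => rfl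
      | succ r' =>
        have := h1 0 (by omega)
        rw [List.getD_cons_zero] at this
        exact absurd this hx

lemma pvBisect_eq_findPos (order : List (Int × Int)) (p : Int × Int) (hs : pvSortedOrd order) :
    pvBisect order p 0 order.length = pvFindPos order p := by
  obtain ⟨h1, h2, h3⟩ := pvBisect_inv order p hs order.length 0 order.length rfl
    (by omega) le_rfl (by omega) (by omega)
  exact (pvFindPos_eq order p _ h3 h1 h2).symm

lemma pvInsort_eq (order : List (Int × Int)) (p : Int × Int) (hs : pvSortedOrd order) :
    pvInsort order p = order.take (pvFindPos order p) ++ p :: order.drop (pvFindPos order p) := by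
  unfold pvInsort
  rw [pvBisect_eq_findPos order p hs]
  exact PySem.List.insert_natCast order (pvFindPos order p) p (pvFindPos_le order p)

-- recursion equations for the ordered insertion
lemma pvInsort_nil (p : Int × Int) : pvInsort [] p = [p] := by
  rw [pvInsort_eq [] p (List.Pairwise.nil)]
  rfl

lemma pvInsort_cons (x : Int × Int) (t : List (Int × Int)) (p : Int × Int)
    (hs : pvSortedOrd (x :: t)) :
    pvInsort (x :: t) p = if pvLt x p then x :: pvInsort t p else p :: x :: t := by
  rw [pvInsort_eq _ p hs, pvInsort_eq t p (List.pairwise_cons.mp hs).2]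
  simp only [pvFindPos]
  split_ifs with h
  · simp
  · simp

lemma pvInsort_perm (order : List (Int × Int)) (p : Int × Int) (hs : pvSortedOrd order) :
    (pvInsort order p).Perm (p :: order) := by
  induction order with
  | nil => rw [pvInsort_nil]
  | cons x t ih =>
    rw [pvInsort_cons x t p hs]
    split_ifs with h
    · exact (((ih (List.pairwise_cons.mp hs).2).cons x).trans (List.Perm.swap p x t))
    · exact List.Perm.refl _

lemma pvInsort_sorted (order : List (Int × Int)) (p : Int × Int)
    (hs : pvSortedOrd order) (hc : ∀ x ∈ order, x.2 ≠ p.2) :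
    pvSortedOrd (pvInsort order p) := by
  induction order with
  | nil => rw [pvInsort_nil]; exact List.pairwise_singleton _ _
  | cons x t ih =>
    have hx := (List.pairwise_cons.mp hs).1
    have ht := (List.pairwise_cons.mp hs).2
    rw [pvInsort_cons x t p hs]
    split_ifs with h
    · refine List.Pairwise.cons ?_ (ih ht (fun y hy => hc y (List.mem_cons_of_mem x hy)))
      intro y hy
      rcases List.mem_cons.mp ((pvInsort_perm t p ht).mem_iff.mp hy) with hy | hy
      · subst hy; exact h
      · exact hx y hy
    · have hpx : pvLt p x = true := by
        rcases pvLt_total (fun he => hc x List.mem_cons_self he.symm) with h' | h'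
        · exact h'
        · exact absurd h' h
      refine List.Pairwise.cons ?_ (List.Pairwise.cons hx ht)
      intro y hy
      rcases List.mem_cons.mp hy with hy | hy
      · subst hy; exact hpx
      · exact pvLt_trans hpx (hx y hy)

lemma pvPairs_getElem (res : List Int) (i : Nat) (h : i < res.length) :
    (pvPairs res)[i]'(by simp [pvPairs]; omega) = (res[i], (i : Int)) := by
  simp [pvPairs, List.getElem_zipIdx]

-- the slots of pvPairs res are pairwise distinct
lemma pvPairs_snd_nodup (res : List Int) : ((pvPairs res).map Prod.snd).Nodup := by
  have h : (pvPairs res).map Prod.snd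
      = (res.zipIdx.map Prod.snd).map (fun i : Nat => (i : Int)) := by
    simp only [pvPairs, List.map_map]
    rfl
  rw [h]
  exact (List.nodup_zipIdx_map_snd res).map (fun a b hab => Int.natCast_inj.mp hab)

lemma pvPairs_mem {res : List Int} {x : Int × Int} (h : x ∈ pvPairs res) :
    ∃ (j : Nat) (hj : j < res.length), x = (res[j]'hj, (j : Int)) := by
  obtain ⟨k, hk, he⟩ := List.mem_iff_getElem.mp h
  have hk' : k < res.length := by simpa [pvPairs] using hk
  refine ⟨k, hk', ?_⟩
  rw [← he]
  exact pvPairs_getElem res k hk'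

lemma pvPairs_length (res : List Int) : (pvPairs res).length = res.length := by
  simp [pvPairs]

lemma pvPairs_append (res : List Int) (x : Int) :
    pvPairs (res ++ [x]) = pvPairs res ++ [(x, (res.length : Int))] := by
  apply List.ext_getElem
  · simp [pvPairs]
  · intro i h1 h2
    simp only [pvPairs, List.getElem_map, List.getElem_zipIdx] at *
    rcases Nat.lt_or_ge i res.length with h | h
    · simp [List.getElem_append, List.getElem_zipIdx, h]
    · have : i = res.length := by simp [pvPairs] at h2; omega
      subst this
      simp [List.getElem_append, List.getElem_zipIdx]

lemma pvPairs_set (res : List Int) (i : Nat) (x : Int) (h : i < res.length) :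
    pvPairs (res.set i x) = (pvPairs res).set i (x, (i : Int)) := by
  apply List.ext_getElem
  · simp [pvPairs]
  · intro j h1 h2
    simp only [pvPairs, List.getElem_map, List.getElem_zipIdx, List.getElem_set]
    by_cases hj : j = i
    · simp [hj]
    · rw [if_neg (fun he => hj he.symm), if_neg (fun he => hj he.symm)]

-- head of a sorted permutation of pvPairs res is (min res, first slot of that min)
lemma pv_head_min (res : List Int) (v : Int) (slot : Int) (rest : List (Int × Int))
    (hs : pvSortedOrd ((v, slot) :: rest)) (hp : ((v, slot) :: rest).Perm (pvPairs res)) :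
    ∃ (i : Nat) (h : i < res.length), slot = (i : Int) ∧ res[i]'h = v ∧
      PySem.List.min? res (fun x => x) = some v ∧
      PySem.List.index? res v = some i := by
  -- position of the head in pvPairs res
  obtain ⟨i, hi, hhead⟩ := pvPairs_mem (hp.mem_iff.mp List.mem_cons_self)
  have hv : v = res[i]'hi := congrArg Prod.fst hhead
  have hslot : slot = (i : Int) := congrArg Prod.snd hhead
  -- the head is (non-strictly) below every pair of pvPairs res
  have hle : ∀ y ∈ pvPairs res, y = (v, slot) ∨ pvLt (v, slot) y = true := by
    intro y hy
    rcases List.mem_cons.mp (hp.symm.mem_iff.mp hy) with hy | hy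
    · exact Or.inl hy
    · exact Or.inr ((List.pairwise_cons.mp hs).1 y hy)
  have hne : res ≠ [] := by
    intro he; subst he; simp at hi
  have hval : ∀ (j : Nat) (hj : j < res.length), v ≤ res[j]'hj := by
    intro j hj
    rcases hle (res[j]'hj, (j : Int)) (by rw [← pvPairs_getElem res j hj]; exact List.getElem_mem _) with h | h
    · rw [Prod.mk.injEq] at h; omega
    · rw [pvLt_iff] at h; simp at h; omega
  have hfirst : ∀ (j : Nat) (hj : j < i), res[j]'(by omega) ≠ v := by
    intro j hj
    have hjlen : j < res.length := by omega
    rcases hle (res[j]'hjlen, (j : Int)) (by rw [← pvPairs_getElem res j hjlen]; exact List.getElem_mem _) with h | h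
    · rw [Prod.mk.injEq] at h
      have : (j : Int) = slot := h.2
      rw [hslot] at this; omega
    · rw [pvLt_iff] at h
      simp only [hslot] at h
      intro hev
      rw [hev] at h
      rcases h with h | ⟨h1, h2⟩
      · omega
      · have : (i : Int) < (j : Int) := h2
        omega
  -- min? res = some v
  obtain ⟨m, hm⟩ : ∃ m, PySem.List.min? res (fun x => x) = some m := by
    cases h : PySem.List.min? res (fun x => x) with
    | none => exact absurd ((PySem.List.min?_eq_none_iff res _).mp h) hne
    | some m => exact ⟨m, rfl⟩
  have hmv : m = v := by
    have h1 : m ≤ v := by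
      have := PySem.List.min?_isMin hm (res[i]'hi) (List.getElem_mem hi)
      omega
    have h2 : v ≤ m := by
      obtain ⟨j, hj, hjm⟩ := List.mem_iff_getElem.mp (PySem.List.min?_mem hm)
      have := hval j hj
      omega
    omega
  refine ⟨i, hi, hslot, hv.symm, by rw [hm, hmv], ?_⟩
  rw [PySem.List.index?_eq_some_iff]
  refine ⟨res.take i, res.drop (i + 1), ?_, ?_, ?_⟩
  · conv_lhs => rw [← List.take_append_drop i res]
    rw [List.drop_eq_getElem_cons hi, ← hv]
  · simp [List.length_take, le_of_lt hi]
  · intro hmt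
    obtain ⟨j, hj, hjm⟩ := List.mem_take_iff_getElem.mp hmt
    exact hfirst j (lt_of_lt_of_le hj (min_le_left _ _)) hjm

-- main simulation invariant: A's and B's folds stay in lock step
lemma pv_main (n : Int) : ∀ (l : List Int) (res : List Int) (order : List (Int × Int)),
    pvSortedOrd order → order.Perm (pvPairs res) →
    (l.foldl (pvStepA n) (res, PySem.List.min? res (fun x => x))).1
      = (l.foldl (pvStepB n) (res, order)).1 := by
  intro l
  induction l with
  | nil => intro res order _ _; rfl
  | cons x t ih =>
    intro res order hs hp
    rw [List.foldl_cons, List.foldl_cons]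
    by_cases h : (res.length : Int) < n
    · -- fill phase: both append x, B inserts the new pair into the index
      have hA : pvStepA n (res, PySem.List.min? res (fun y => y)) x
          = (res ++ [x], PySem.List.min? (res ++ [x]) (fun y => y)) := by
        simp [pvStepA, h]
      have hB : pvStepB n (res, order) x
          = (res ++ [x], pvInsort order (x, (res.length : Int))) := by
        simp [pvStepB, h]
      rw [hA, hB]
      refine ih (res ++ [x]) _ ?_ ?_
      · refine pvInsort_sorted order _ hs ?_
        intro y hy
        obtain ⟨j, hj, hje⟩ := pvPairs_mem (hp.mem_iff.mp hy)
        rw [hje]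
        intro he
        have : (j : Int) = (res.length : Int) := he
        omega
      · refine (pvInsort_perm order _ hs).trans ?_
        rw [pvPairs_append]
        exact ((hp.cons _).trans (List.perm_append_singleton _ _).symm).symm.symm
    · -- full buffer
      cases horder : order with
      | nil =>
        -- res must be empty too; both steps leave the state unchanged
        have hres : res = [] := by
          have := hp
          rw [horder] at this
          have hnil := this.symm.eq_nil
          cases res with
          | nil => rfl
          | cons a b => simp [pvPairs] at hnil
        subst hres
        have h0 : PySem.List.min? ([] : List Int) (fun y => y) = none :=
          (PySem.List.min?_eq_none_iff [] _).mpr rfl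
        have hA : pvStepA n ([], PySem.List.min? [] (fun y => y)) x
            = ([], PySem.List.min? [] (fun y => y)) := by
          rw [h0]
          simp only [pvStepA]
          rw [if_neg (by simpa using h)]
        have hB : pvStepB n (([] : List Int), ([] : List (Int × Int))) x
            = (([] : List Int), ([] : List (Int × Int))) := by
          simp only [pvStepB]
          rw [if_neg (by simpa using h)]
        rw [hA, hB]
        exact ih [] [] (by rw [horder] at hs; exact hs) (by rw [horder] at hp; exact hp)
      | cons hd rest =>
        obtain ⟨v, slot⟩ := hd
        rw [horder] at hs hp
        obtain ⟨i, hi, hslot, hvi, hmin, hidx⟩ := pv_head_min res v slot rest hs hp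
        have hA : pvStepA n (res, PySem.List.min? res (fun y => y)) x
            = if v < x then (res.set i x, PySem.List.min? (res.set i x) (fun y => y))
              else (res, PySem.List.min? res (fun y => y)) := by
          simp only [pvStepA, h, if_false, hmin, hidx]
        have hB : pvStepB n (res, (v, slot) :: rest) x
            = if v < x then (res.set i x, pvInsort rest (x, slot)) else (res, (v, slot) :: rest) := by
          simp only [pvStepB, h, if_false]
          rw [hslot]
          simp [PySem.List.pySetD_natCast]
        rw [hA, hB]
        by_cases hvx : v < x
        · rw [if_pos hvx, if_pos hvx]
          -- distinct slots: the popped slot does not occur in the remaining index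
          have hnodup : (((v, slot) :: rest).map Prod.snd).Nodup := (hp.map Prod.snd).nodup_iff.mpr (pvPairs_snd_nodup res)
          have hslot_notin : ∀ y ∈ rest, y.2 ≠ slot := by
            intro y hy he
            rw [List.map_cons] at hnodup
            obtain ⟨hnot, _⟩ := List.nodup_cons.mp hnodup
            refine hnot ?_
            rw [← he]
            exact List.mem_map.mpr ⟨y, hy, rfl⟩
          refine ih (res.set i x) _ ?_ ?_
          · refine pvInsort_sorted rest _ ((List.pairwise_cons.mp hs).2) ?_
            intro y hy he
            exact hslot_notin y hy he
          · -- index invariant after replacement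
            refine (pvInsort_perm rest _ ((List.pairwise_cons.mp hs).2)).trans ?_
            rw [pvPairs_set res i x hi]
            have hrest : rest.Perm ((pvPairs res).eraseIdx i) := by
              have hsplit : pvPairs res = (pvPairs res).take i ++ (v, slot) :: (pvPairs res).drop (i + 1) := by
                conv_lhs => rw [← List.take_append_drop i (pvPairs res),
                  List.drop_eq_getElem_cons (by rw [pvPairs_length]; exact hi)]
                rw [pvPairs_getElem res i hi, ← hvi, ← hslot]
              have hmid : (pvPairs res).Perm ((v, slot) :: (pvPairs res).eraseIdx i) := by
                rw [List.eraseIdx_eq_take_drop_succ]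
                conv_lhs => rw [hsplit]
                exact List.perm_middle
              exact (hp.trans hmid).cons_inv
            have hset : ((pvPairs res).set i (x, (i : Int))).Perm ((x, (i : Int)) :: (pvPairs res).eraseIdx i) := by
              rw [List.set_eq_take_append_cons_drop, if_pos (by rw [pvPairs_length]; exact hi),
                List.eraseIdx_eq_take_drop_succ]
              exact List.perm_middle
            rw [hslot]
            exact (hrest.cons _).trans hset.symm
        · rw [if_neg hvx, if_neg hvx]
          exact ih res ((v, slot) :: rest) hs hp

-- ===== VERDICT (by name: the statement is the Claim_ definition above) =====
theorem max_n_values_spec : Claim_equal_max_n_values := by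
  intro iterable n _ _
  unfold Spec_max_n_values max_n_values max_n_values_alt
  have h0 : PySem.List.min? ([] : List Int) (fun x => x) = none :=
    (PySem.List.min?_eq_none_iff [] _).mpr rfl
  rw [← h0]
  exact pv_main n iterable [] [] (by constructor) (by rw [show pvPairs [] = [] from rfl])
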